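-- pv_equiv track=rewrite | github.com/SaudiLinux/Loot | modules/vuln_scanner.py | generate_attack_scenarios
-- ===== SOURCE A (Python) =====
-- def generate_attack_scenarios(vulnerabilities):
--     """Generate potential attack scenarios"""
--     scenarios = []
--
--     if any(v['type'] == 'SQL Injection' for v in vulnerabilities):
--         scenarios.append('Data breach through SQL injection')
--
--     if any(v['type'] == 'Cross-Site Scripting (XSS)' for v in vulnerabilities):
--         scenarios.append('Session hijacking through XSS')
--
--     if any('LFI' in v['type'] for v in vulnerabilities):
--         scenarios.append('Source code disclosure through LFI')
--
--     if any('Command Injection' in v['type'] for v in vulnerabilities):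
--         scenarios.append('System compromise through command injection')
--
--     return scenarios
-- ===== SOURCE B (Python) =====
-- def generate_attack_scenarios(vulnerabilities):
--     """Generate potential attack scenarios (single pass collecting flags)"""
--     has_sqli = has_xss = has_lfi = has_cmd = False
--     for v in vulnerabilities:
--         t = v['type']
--         has_sqli = has_sqli or t == 'SQL Injection'
--         has_xss = has_xss or t == 'Cross-Site Scripting (XSS)'
--         has_lfi = has_lfi or 'LFI' in t
--         has_cmd = has_cmd or 'Command Injection' in t
--     scenarios = []
--     if has_sqli:
--         scenarios.append('Data breach through SQL injection')
--     if has_xss: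
--         scenarios.append('Session hijacking through XSS')
--     if has_lfi:
--         scenarios.append('Source code disclosure through LFI')
--     if has_cmd:
--         scenarios.append('System compromise through command injection')
--     return scenarios
-- ===== Notes on version B (the rewrite author's own statement) =====
-- stated objective: alternative
-- what changed: Replaces A's four separate any()-scans over the vulnerability list with a single pass that accumulates four boolean flags and then emits the scenario strings in the fixed order.
import Mathlib
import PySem

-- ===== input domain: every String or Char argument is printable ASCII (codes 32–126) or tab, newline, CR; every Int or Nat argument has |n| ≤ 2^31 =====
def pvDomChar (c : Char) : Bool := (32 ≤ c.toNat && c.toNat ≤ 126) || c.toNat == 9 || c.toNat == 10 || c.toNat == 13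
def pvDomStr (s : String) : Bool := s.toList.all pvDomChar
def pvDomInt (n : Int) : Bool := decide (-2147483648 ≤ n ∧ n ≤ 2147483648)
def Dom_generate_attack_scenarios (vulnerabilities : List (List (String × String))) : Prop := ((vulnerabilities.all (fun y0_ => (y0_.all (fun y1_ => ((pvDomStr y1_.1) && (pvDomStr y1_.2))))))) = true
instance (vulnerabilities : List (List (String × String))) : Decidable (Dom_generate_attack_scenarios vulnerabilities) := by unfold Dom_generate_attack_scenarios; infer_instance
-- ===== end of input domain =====

-- ===== PORT A =====
-- B differs from A only in traversal strategy: one pass with four flags vs four any()-scans.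
-- shared helper: v['type'] as a first-match association-list lookup (default "" is only
-- reachable outside Pre_, where the Python raises KeyError)
def pyTypeOf (v : List (String × String)) : String :=
  ((v.find? (fun p => p.1 == "type")).map Prod.snd).getD ""

def generate_attack_scenarios (vulnerabilities : List (List (String × String))) : List String :=
  let scenarios : List String := []
  let scenarios := if vulnerabilities.any (fun v => pyTypeOf v == "SQL Injection")
    then scenarios ++ ["Data breach through SQL injection"] else scenarios
  let scenarios := if vulnerabilities.any (fun v => pyTypeOf v == "Cross-Site Scripting (XSS)")
    then scenarios ++ ["Session hijacking through XSS"] else scenarios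
  let scenarios := if vulnerabilities.any (fun v => PySem.Str.isIn "LFI" (pyTypeOf v))
    then scenarios ++ ["Source code disclosure through LFI"] else scenarios
  let scenarios := if vulnerabilities.any (fun v => PySem.Str.isIn "Command Injection" (pyTypeOf v))
    then scenarios ++ ["System compromise through command injection"] else scenarios
  scenarios

-- ===== PORT B =====
def generate_attack_scenarios_alt (vulnerabilities : List (List (String × String))) : List String :=
  let flags := vulnerabilities.foldl
    (fun (f : Bool × Bool × Bool × Bool) v =>
      let t := pyTypeOf v
      (f.1 || t == "SQL Injection",
       f.2.1 || t == "Cross-Site Scripting (XSS)",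
       f.2.2.1 || PySem.Str.isIn "LFI" t,
       f.2.2.2 || PySem.Str.isIn "Command Injection" t))
    (false, false, false, false)
  let scenarios : List String := []
  let scenarios := if flags.1 then scenarios ++ ["Data breach through SQL injection"] else scenarios
  let scenarios := if flags.2.1 then scenarios ++ ["Session hijacking through XSS"] else scenarios
  let scenarios := if flags.2.2.1 then scenarios ++ ["Source code disclosure through LFI"] else scenarios
  let scenarios := if flags.2.2.2 then scenarios ++ ["System compromise through command injection"] else scenarios
  scenarios

-- ===== PRECONDITION & SPEC =====
-- Pre_ excludes lists containing a vulnerability dict without a 'type' key: on such inputs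
-- the Python A usually raises KeyError (and our B always does); A returns only in the
-- accidental case where every short-circuiting scan succeeds before reaching the bad dict.
def Pre_generate_attack_scenarios (vulnerabilities : List (List (String × String))) : Prop :=
  ∀ v ∈ vulnerabilities, v.any (fun p => p.1 == "type") = true
instance (vulnerabilities : List (List (String × String))) : Decidable (Pre_generate_attack_scenarios vulnerabilities) := by unfold Pre_generate_attack_scenarios; infer_instance

def pvWitness_generate_attack_scenarios : (List (List (String × String))) :=
  [[("type", "SQL Injection")], [("type", "some LFI issue")]]

def Spec_generate_attack_scenarios (vulnerabilities : List (List (String × String))) (out : List String) : Prop := out = generate_attack_scenarios_alt vulnerabilities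
instance (vulnerabilities : List (List (String × String))) (out : List String) : Decidable (Spec_generate_attack_scenarios vulnerabilities out) := by unfold Spec_generate_attack_scenarios; infer_instance

-- ===== CLAIM (what is proved, stated in full; the proofs are below) =====
def Claim_equal_generate_attack_scenarios : Prop := ∀ (vulnerabilities : List (List (String × String))), Dom_generate_attack_scenarios vulnerabilities → Pre_generate_attack_scenarios vulnerabilities → Spec_generate_attack_scenarios vulnerabilities (generate_attack_scenarios vulnerabilities)

-- ===== LEMMAS AND PROOFS =====

-- the single-pass fold computes exactly the four any-scans
theorem flags_eq_any (vulnerabilities : List (List (String × String)))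
    (a b c d : Bool) :
    vulnerabilities.foldl
      (fun (f : Bool × Bool × Bool × Bool) v =>
        let t := pyTypeOf v
        (f.1 || t == "SQL Injection",
         f.2.1 || t == "Cross-Site Scripting (XSS)",
         f.2.2.1 || PySem.Str.isIn "LFI" t,
         f.2.2.2 || PySem.Str.isIn "Command Injection" t))
      (a, b, c, d)
    = (a || vulnerabilities.any (fun v => pyTypeOf v == "SQL Injection"),
       b || vulnerabilities.any (fun v => pyTypeOf v == "Cross-Site Scripting (XSS)"),
       c || vulnerabilities.any (fun v => PySem.Str.isIn "LFI" (pyTypeOf v)),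
       d || vulnerabilities.any (fun v => PySem.Str.isIn "Command Injection" (pyTypeOf v))) := by
  induction vulnerabilities generalizing a b c d with
  | nil => simp
  | cons v vs ih =>
      simp only [List.foldl_cons, List.any_cons, ih]
      simp [Bool.or_assoc]

-- ===== VERDICT (by name: the statement is the Claim_ definition above) =====
theorem generate_attack_scenarios_spec : Claim_equal_generate_attack_scenarios := by
  intro vulnerabilities _ _
  unfold Spec_generate_attack_scenarios generate_attack_scenarios generate_attack_scenarios_alt
  rw [flags_eq_any]
  simp
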